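-- pv_equiv track=rewrite | github.com/levbush/Yandex | Основы программирования на Python Д24/Функции. Возвращение значений из функций/Тень, знай своё место.py | make_shades
-- ===== SOURCE A (Python) =====
-- def make_shades(alley: list[int], k: int) -> list[bool]:
--     if k == 0:
--         return [True if alley[i] else False for i in range(len(alley))]
--     li = []
--     i = 0
--     temp = 0
--     for i in range(len(alley)) if k > 0 else range(len(alley) - 1, -1, -1):
--         if alley[i]:
--             temp = max(temp, alley[i] * abs(k) + 1)
--         if temp:
--             li.append(True) if k > 0 else li.insert(0, True)
--             temp -= 1
--         else:
--             li.append(False) if k > 0 else li.insert(0, False)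
--     return li
-- ===== SOURCE B (Python) =====
-- def _lit_row(alley, K):
--     # cell i is lit iff some lamp at j <= i with positive height reaches it
--     return [any(alley[j] > 0 and i - j <= alley[j] * K for j in range(i + 1))
--             for i in range(len(alley))]
--
-- def make_shades(alley, k):
--     if k == 0:
--         return [bool(x) for x in alley]
--     if k < 0:
--         return _lit_row(alley[::-1], -k)[::-1]
--     return _lit_row(alley, k)
-- ===== Notes on version B (the rewrite author's own statement) =====
-- stated objective: alternative
-- what changed: A sweeps once with a decaying max-counter (direction chosen by the sign of k, building the list by append or insert(0)); B instead tests each cell directly for coverage by some positive lamp and reduces the k<0 case to the k>0 case by reversing the alley.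
import Mathlib
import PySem

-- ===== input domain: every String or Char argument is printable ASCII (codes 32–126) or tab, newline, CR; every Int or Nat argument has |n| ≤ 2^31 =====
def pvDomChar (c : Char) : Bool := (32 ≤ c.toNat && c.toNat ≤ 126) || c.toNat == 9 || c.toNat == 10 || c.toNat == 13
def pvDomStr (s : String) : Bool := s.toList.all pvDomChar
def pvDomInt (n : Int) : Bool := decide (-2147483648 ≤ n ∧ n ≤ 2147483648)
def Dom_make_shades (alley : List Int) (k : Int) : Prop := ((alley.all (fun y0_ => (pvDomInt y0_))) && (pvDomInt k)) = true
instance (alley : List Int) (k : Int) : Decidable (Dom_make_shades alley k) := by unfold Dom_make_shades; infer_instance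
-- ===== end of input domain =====

-- B replaces A's directional sweep with a decaying counter by a per-cell coverage test
-- (cell i is lit iff some positive lamp at j reaches it), with k<0 reduced to k>0 by
-- reversal; objective: alternative (not faster).

-- ===== PORT A =====
-- A's loop body: state (temp, li); for k>0 li.append, for k<0 li.insert(0, ·);
-- the element visited at a given step is the alley[i] that step indexes.
def stepA (k : Int) (st : Int × List Bool) (a : Int) : Int × List Bool :=
  let temp := if a ≠ 0 then max st.1 (a * |k| + 1) else st.1
  if temp ≠ 0 then (temp - 1, if k > 0 then st.2 ++ [true] else true :: st.2)
  else (temp, if k > 0 then st.2 ++ [false] else false :: st.2)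

def make_shades (alley : List Int) (k : Int) : List Bool :=
  if k = 0 then alley.map (fun a => decide (a ≠ 0))
  else if k > 0 then (alley.foldl (stepA k) (0, [])).2
  else
    -- range(len(alley)-1, -1, -1) visits alley[n-1] … alley[0], i.e. alley.reverse
    -- in order; li.insert(0, b) at each step is cons onto the accumulator.
    (alley.reverse.foldl (stepA k) (0, [])).2

-- ===== PORT B =====
-- Source B's _lit_row: comprehension over i in range(len), any over j in range(i+1)
def lit_row (alley : List Int) (K : Int) : List Bool :=
  (List.range alley.length).map (fun i =>
    (List.range (i + 1)).any (fun j =>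
      decide (0 < alley.getD j 0 ∧ (i : Int) - (j : Int) ≤ alley.getD j 0 * K)))

def make_shades_alt (alley : List Int) (k : Int) : List Bool :=
  if k = 0 then alley.map (fun a => decide (a ≠ 0))
  else if k < 0 then (lit_row alley.reverse (-k)).reverse
  else lit_row alley k

-- ===== PRECONDITION & SPEC =====
def Spec_make_shades (alley : List Int) (k : Int) (out : List Bool) : Prop := out = make_shades_alt alley k
instance (alley : List Int) (k : Int) (out : List Bool) : Decidable (Spec_make_shades alley k out) := by unfold Spec_make_shades; infer_instance

-- ===== CLAIM (what is proved, stated in full; the proofs are below) =====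
def Claim_equal_make_shades : Prop := ∀ (alley : List Int) (k : Int), Dom_make_shades alley k → Spec_make_shades alley k (make_shades alley k)

-- ===== LEMMAS AND PROOFS =====

def bitAt (K : Int) (l : List Int) (m : Nat) : Bool :=
  (List.range (m + 1)).any (fun j =>
    decide (0 < l.getD j 0 ∧ (m : Int) - (j : Int) ≤ l.getD j 0 * K))

def loopOut (K : Int) : List Int → Int → List Bool
  | [], _ => []
  | a :: rest, t =>
    let t1 := if a ≠ 0 then max t (a * K + 1) else t
    if t1 ≠ 0 then true :: loopOut K rest (t1 - 1) else false :: loopOut K rest t1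

theorem bitAt_zero (K : Int) (a : Int) (rest : List Int) :
    bitAt K (a :: rest) 0 = decide (0 < (if 0 < a then a * K + 1 else 0)) := by
  unfold bitAt
  by_cases ha : 0 < a <;> simp [ha]

theorem bitAt_succ (K : Int) (a : Int) (rest : List Int) (m : Nat) :
    bitAt K (a :: rest) (m + 1) =
      (decide ((m : Int) + 1 < (if 0 < a then a * K + 1 else 0)) || bitAt K rest m) := by
  unfold bitAt
  rw [List.range_succ_eq_map (n := m + 1)]
  simp only [List.any_cons, List.any_map, List.getD_cons_zero, Nat.cast_zero,
    Nat.cast_add, Nat.cast_one]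
  have hhead : decide (0 < a ∧ (m : Int) + 1 - 0 ≤ a * K)
      = decide ((m : Int) + 1 < if 0 < a then a * K + 1 else 0) := by
    by_cases ha : 0 < a
    · rw [if_pos ha]
      apply decide_eq_decide.mpr
      constructor
      · rintro ⟨_, h⟩; omega
      · intro h; exact ⟨ha, by omega⟩
    · rw [if_neg ha]
      apply decide_eq_decide.mpr
      constructor
      · rintro ⟨h, _⟩; exact absurd h ha
      · intro h; exfalso; omega
  rw [hhead]
  congr 1
  refine congrArg _ (funext fun j => ?_)
  simp only [Function.comp_apply, List.getD_cons_succ]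
  apply decide_eq_decide.mpr
  constructor <;> (rintro ⟨h1, h2⟩; refine ⟨h1, ?_⟩; push_cast at h2 ⊢; omega)

theorem loopOut_eq (K : Int) (hK : 1 ≤ K) :
    ∀ (l : List Int) (t : Int), 0 ≤ t →
      loopOut K l t =
        (List.range l.length).map (fun m : Nat => decide ((m : Int) < t) || bitAt K l m) := by
  intro l
  induction l with
  | nil => intro t _; simp [loopOut]
  | cons a rest ih =>
    intro t ht
    have ha0 : 0 ≤ (if 0 < a then a * K + 1 else 0) := by
      split_ifs with h
      · nlinarith
      · omega
    have ht1 : (if a ≠ 0 then max t (a * K + 1) else t)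
        = max t (if 0 < a then a * K + 1 else 0) := by
      by_cases h1 : a = 0
      · simp [h1]; omega
      · by_cases h2 : 0 < a
        · simp [h1, h2]
        · have ha1 : a ≤ -1 := by omega
          have hneg : a * K + 1 ≤ 0 := by nlinarith
          simp [h1, h2]
          omega
    rw [show loopOut K (a :: rest) t
        = (if (if a ≠ 0 then max t (a * K + 1) else t) ≠ 0
           then true :: loopOut K rest ((if a ≠ 0 then max t (a * K + 1) else t) - 1)
           else false :: loopOut K rest (if a ≠ 0 then max t (a * K + 1) else t)) from rfl]
    rw [ht1]
    rw [List.length_cons, List.range_succ_eq_map]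
    simp only [List.map_cons, List.map_map]
    by_cases hz : max t (if 0 < a then a * K + 1 else 0) = 0
    · rw [if_neg (by omega), ih _ (by omega)]
      congr 1
      · rw [bitAt_zero K a rest]
        have h1 : ¬ ((0:Int) < t) := by omega
        have h2 : ¬ ((0:Int) < (if 0 < a then a * K + 1 else 0)) := by omega
        simp [h1, h2]
      · apply List.map_congr_left
        intro m _
        simp only [Function.comp_apply]
        rw [bitAt_succ K a rest m]
        by_cases hpa : 0 < a
        · simp only [if_pos hpa] at hz ⊢
          cases hb : bitAt K rest m <;>
            (apply Bool.eq_iff_iff.mpr; simp only [hb, Bool.or_eq_true, Bool.or_true, Bool.or_false, decide_eq_true_eq, Nat.succ_eq_add_one, Nat.cast_add, Nat.cast_one]; try omega)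
        · simp only [if_neg hpa] at hz ⊢
          cases hb : bitAt K rest m <;>
            (apply Bool.eq_iff_iff.mpr; simp only [hb, Bool.or_eq_true, Bool.or_true, Bool.or_false, decide_eq_true_eq, Nat.succ_eq_add_one, Nat.cast_add, Nat.cast_one]; try omega)
    · rw [if_pos (by omega), ih _ (by omega : (0:Int) ≤ max t (if 0 < a then a * K + 1 else 0) - 1)]
      congr 1
      · rw [bitAt_zero K a rest]
        have : (0:Int) < t ∨ 0 < (if 0 < a then a * K + 1 else 0) := by omega
        rcases this with h | h <;> simp [h]
      · apply List.map_congr_left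
        intro m _
        simp only [Function.comp_apply]
        rw [bitAt_succ K a rest m]
        by_cases hpa : 0 < a
        · simp only [if_pos hpa] at hz ⊢
          cases hb : bitAt K rest m <;>
            (apply Bool.eq_iff_iff.mpr; simp only [hb, Bool.or_eq_true, Bool.or_true, Bool.or_false, decide_eq_true_eq, Nat.succ_eq_add_one, Nat.cast_add, Nat.cast_one]; try omega)
        · simp only [if_neg hpa] at hz ⊢
          cases hb : bitAt K rest m <;>
            (apply Bool.eq_iff_iff.mpr; simp only [hb, Bool.or_eq_true, Bool.or_true, Bool.or_false, decide_eq_true_eq, Nat.succ_eq_add_one, Nat.cast_add, Nat.cast_one]; try omega)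

theorem fold_app (k : Int) (hk : 0 < k) :
    ∀ (l : List Int) (t : Int) (acc : List Bool),
      (List.foldl (stepA k) (t, acc) l).2 = acc ++ loopOut |k| l t := by
  intro l
  induction l with
  | nil => intro t acc; simp [loopOut]
  | cons a rest ih =>
    intro t acc
    simp only [List.foldl, stepA, loopOut]
    by_cases h : (if a = 0 then t else max t (a * |k| + 1)) = 0 <;>
      simp [h, hk, ih]

theorem fold_cons (k : Int) (hk : k < 0) :
    ∀ (l : List Int) (t : Int) (acc : List Bool),
      (List.foldl (stepA k) (t, acc) l).2 = (loopOut |k| l t).reverse ++ acc := by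
  intro l
  induction l with
  | nil => intro t acc; simp [loopOut]
  | cons a rest ih =>
    intro t acc
    have hk' : ¬ (0 < k) := by omega
    simp only [List.foldl, stepA, loopOut]
    by_cases h : (if a = 0 then t else max t (a * |k| + 1)) = 0 <;>
      simp [h, hk', ih]

theorem lit_row_eq_bit (l : List Int) (K : Int) :
    lit_row l K = (List.range l.length).map (bitAt K l) := rfl

theorem map_drop_zero (K : Int) (l : List Int) :
    (List.range l.length).map (fun m : Nat => decide ((m : Int) < 0) || bitAt K l m)
      = (List.range l.length).map (bitAt K l) := by
  apply List.map_congr_left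
  intro m _
  simp

-- ===== VERDICT (by name: the statement is the Claim_ definition above) =====
theorem make_shades_spec : Claim_equal_make_shades := by
  unfold Claim_equal_make_shades Spec_make_shades
  intro alley k _
  unfold make_shades make_shades_alt
  by_cases h0 : k = 0
  · simp [h0]
  by_cases hp : k > 0
  · have hnn : ¬ k < 0 := by omega
    simp only [if_neg h0, if_pos hp, if_neg hnn]
    rw [fold_app k hp alley 0 []]
    rw [abs_of_pos hp]
    rw [loopOut_eq k (by omega) alley 0 le_rfl]
    rw [lit_row_eq_bit, List.nil_append, map_drop_zero]
  · have hn : k < 0 := by omega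
    simp only [if_neg h0, if_neg hp, if_pos hn]
    rw [fold_cons k hn alley.reverse 0 []]
    rw [abs_of_neg hn]
    rw [loopOut_eq (-k) (by omega) alley.reverse 0 le_rfl]
    rw [lit_row_eq_bit, List.append_nil, map_drop_zero]
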